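-- pv_equiv track=rewrite | github.com/RASAAS/docmcp-knowledge | scripts/postprocess_fulltext.py | split_into_table_blocks
-- ===== SOURCE A (Python) =====
-- def split_into_table_blocks(lines: list[str]) -> list[tuple[str, list[str]]]:
--     """
--     Split lines into alternating non-table and table blocks.
--     Returns list of ('text'|'table', [lines]) tuples.
--     """
--     blocks = []
--     current_type = None
--     current = []
--
--     for line in lines:
--         in_table = line.startswith('|')
--         block_type = 'table' if in_table else 'text'
--         if block_type != current_type:
--             if current:
--                 blocks.append((current_type, current))
--             current_type = block_type
--             current = [line]
--         else:
--             current.append(line)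
--
--     if current:
--         blocks.append((current_type, current))
--     return blocks
-- ===== SOURCE B (Python) =====
-- def split_into_table_blocks(lines: list[str]) -> list[tuple[str, list[str]]]:
--     """Span-based grouping: find each maximal run of same-kind lines and slice it out."""
--     blocks = []
--     i = 0
--     n = len(lines)
--     while i < n:
--         k = 'table' if lines[i].startswith('|') else 'text'
--         j = i + 1
--         while j < n and ('table' if lines[j].startswith('|') else 'text') == k:
--             j += 1
--         blocks.append((k, lines[i:j]))
--         i = j
--     return blocks
-- ===== Notes on version B (the rewrite author's own statement) =====
-- stated objective: alternative
-- what changed: Replaces the current_type/current flush state machine with outer/inner span loops that slice each maximal run of same-kind lines directly out of the list.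
import Mathlib
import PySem

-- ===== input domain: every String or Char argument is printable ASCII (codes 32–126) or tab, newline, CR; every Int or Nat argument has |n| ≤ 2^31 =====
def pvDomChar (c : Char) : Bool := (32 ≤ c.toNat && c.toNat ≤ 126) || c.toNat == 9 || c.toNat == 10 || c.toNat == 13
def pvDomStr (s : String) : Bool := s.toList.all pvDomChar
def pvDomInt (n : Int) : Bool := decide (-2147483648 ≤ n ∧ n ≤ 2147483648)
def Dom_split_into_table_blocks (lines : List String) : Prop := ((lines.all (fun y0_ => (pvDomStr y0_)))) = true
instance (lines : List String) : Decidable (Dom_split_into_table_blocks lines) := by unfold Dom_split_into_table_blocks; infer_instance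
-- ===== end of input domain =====

-- B replaces A's current_type/current flush state machine by span-style grouping
-- (take the maximal run of same-kind lines, emit it, recurse): alternative decomposition, same cost.


-- ===== PORT A =====
-- the for-loop of A, carrying (blocks, current_type, current); current_type = none is Python's None
def pvLoopA : List String → List (String × List String) → Option String → List String → List (String × List String)
  | [], blocks, ct, cur =>
    if cur.isEmpty then blocks else blocks ++ [(ct.getD "", cur)]
  | l :: ls, blocks, ct, cur =>
    let blockType := if PySem.Str.startswith l "|" then "table" else "text"
    if some blockType ≠ ct then
      pvLoopA ls (if cur.isEmpty then blocks else blocks ++ [(ct.getD "", cur)]) (some blockType) [l]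
    else
      pvLoopA ls blocks ct (cur ++ [l])

def split_into_table_blocks (lines : List String) : List (String × List String) :=
  pvLoopA lines [] none []

-- ===== PORT B =====
def pvKey (l : String) : String := if PySem.Str.startswith l "|" then "table" else "text"

def split_into_table_blocks_alt : List String → List (String × List String)
  | [] => []
  | l :: ls =>
    let k := pvKey l
    (k, l :: ls.takeWhile (fun x => pvKey x == k)) ::
      split_into_table_blocks_alt (ls.dropWhile (fun x => pvKey x == k))
termination_by lines => lines.length
decreasing_by
  simp only [List.length_cons]
  exact Nat.lt_succ_of_le (List.length_dropWhile_le _ _)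

-- ===== PRECONDITION & SPEC =====
def Spec_split_into_table_blocks (lines : List String) (out : List (String × List String)) : Prop := out = split_into_table_blocks_alt lines
instance (lines : List String) (out : List (String × List String)) : Decidable (Spec_split_into_table_blocks lines out) := by unfold Spec_split_into_table_blocks; infer_instance

-- ===== CLAIM (what is proved, stated in full; the proofs are below) =====
def Claim_equal_split_into_table_blocks : Prop := ∀ (lines : List String), Dom_split_into_table_blocks lines → Spec_split_into_table_blocks lines (split_into_table_blocks lines)

-- ===== LEMMAS AND PROOFS =====

-- merge a pending run (k, cur) into the front of an already-grouped list
def pvMergeHead (k : String) (cur : List String) : List (String × List String) → List (String × List String)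
  | [] => [(k, cur)]
  | (k', g) :: rest => if k' = k then (k, cur ++ g) :: rest else (k, cur) :: (k', g) :: rest

theorem pvAlt_cons (l : String) (ls : List String) :
    split_into_table_blocks_alt (l :: ls) = pvMergeHead (pvKey l) [l] (split_into_table_blocks_alt ls) := by
  cases ls with
  | nil => simp [split_into_table_blocks_alt, pvMergeHead]
  | cons m ms =>
    by_cases h : pvKey m = pvKey l
    · rw [split_into_table_blocks_alt, split_into_table_blocks_alt]
      simp only [List.takeWhile, List.dropWhile, h, beq_self_eq_true, pvMergeHead,
        List.singleton_append]
      simp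
    · have hb : (pvKey m == pvKey l) = false := by simp [h]
      rw [split_into_table_blocks_alt]
      conv_rhs => rw [split_into_table_blocks_alt]
      simp only [List.takeWhile, List.dropWhile, hb, pvMergeHead, if_neg h]
      rw [split_into_table_blocks_alt]

theorem pvMerge_same (k l : String) (cur : List String) (gs : List (String × List String)) :
    pvMergeHead k cur (pvMergeHead k [l] gs) = pvMergeHead k (cur ++ [l]) gs := by
  cases gs with
  | nil => simp [pvMergeHead]
  | cons p rest =>
    obtain ⟨k', g⟩ := p
    by_cases h : k' = k <;> simp [pvMergeHead, h]

theorem pvMerge_ne (k k' : String) (cur d : List String) (gs : List (String × List String))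
    (h : k' ≠ k) : pvMergeHead k cur (pvMergeHead k' d gs) = (k, cur) :: pvMergeHead k' d gs := by
  cases gs with
  | nil => simp [pvMergeHead, h]
  | cons p rest =>
    obtain ⟨k'', g⟩ := p
    by_cases h2 : k'' = k' <;> simp [pvMergeHead, h, h2]

theorem pvLoopA_merge (ls : List String) :
    ∀ (blocks : List (String × List String)) (k : String) (cur : List String), cur ≠ [] →
      pvLoopA ls blocks (some k) cur = blocks ++ pvMergeHead k cur (split_into_table_blocks_alt ls) := by
  induction ls with
  | nil =>
    intro blocks k cur hcur
    simp [pvLoopA, split_into_table_blocks_alt, pvMergeHead, List.isEmpty_iff, hcur]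
  | cons l ls ih =>
    intro blocks k cur hcur
    rw [pvAlt_cons]
    by_cases h : (if PySem.Str.startswith l "|" then "table" else "text") = k
    · rw [pvLoopA]
      have hcond : ¬ (some (if PySem.Str.startswith l "|" = true then "table" else "text") ≠ some k) :=
        fun hn => hn (congrArg some h)
      rw [if_neg hcond]
      rw [ih blocks k (cur ++ [l]) (by simp)]
      have hk : pvKey l = k := h
      rw [hk, pvMerge_same]
    · rw [pvLoopA]
      simp only [ne_eq, Option.some.injEq, h, not_false_eq_true, ite_true,
        List.isEmpty_iff, hcur, Option.getD_some]
      rw [if_neg not_false]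
      rw [show (if PySem.Str.startswith l "|" = true then "table" else "text") = pvKey l from rfl]
      rw [ih (blocks ++ [(k, cur)]) _ [l] (by simp)]
      have hk : pvKey l ≠ k := h
      rw [pvMerge_ne k (pvKey l) cur [l] _ hk]
      simp

-- ===== VERDICT (by name: the statement is the Claim_ definition above) =====
theorem split_into_table_blocks_spec : Claim_equal_split_into_table_blocks := by
  intro lines _
  unfold Spec_split_into_table_blocks split_into_table_blocks
  cases lines with
  | nil => simp [pvLoopA, split_into_table_blocks_alt]
  | cons l ls =>
    rw [pvLoopA]
    simp only [ne_eq, reduceCtorEq, not_false_eq_true, ite_true, List.isEmpty_nil]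
    rw [show (if PySem.Str.startswith l "|" = true then "table" else "text") = pvKey l from rfl]
    rw [pvLoopA_merge ls [] (pvKey l) [l] (by simp), pvAlt_cons]
    simp
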